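-- pv_equiv track=rewrite | github.com/engstromaaron-cyber/fedreg-stock-scanner | summarizer.py | _pick_sentence
-- ===== SOURCE A (Python) =====
-- IMPACT_PHRASES = [
--     "would",
--     "will",
--     "proposes",
--     "requires",
--     "increase",
--     "decrease",
--     "restrict",
--     "expand",
--     "tighten",
--     "mandate",
--     "compliance",
--     "cost",
--     "standard",
--     "investigation",
--     "approval",
--     "reclassify",
--     "delay",
-- ]
--
-- def _pick_sentence(sentences: list[str], fallback: str = "") -> str:
--     scored = []
--     for sentence in sentences:
--         lowered = sentence.lower()
--         score = sum(1 for phrase in IMPACT_PHRASES if phrase in lowered)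
--         score += min(len(sentence) // 80, 3)
--         scored.append((score, sentence))
--     scored.sort(key=lambda item: item[0], reverse=True)
--     return scored[0][1] if scored else fallback
-- ===== SOURCE B (Python) =====
-- IMPACT_PHRASES = [
--     "would",
--     "will",
--     "proposes",
--     "requires",
--     "increase",
--     "decrease",
--     "restrict",
--     "expand",
--     "tighten",
--     "mandate",
--     "compliance",
--     "cost",
--     "standard",
--     "investigation",
--     "approval",
--     "reclassify",
--     "delay",
-- ]
--
-- def _pick_sentence(sentences: list[str], fallback: str = "") -> str:
--     best_score = None
--     best = fallback
--     for sentence in sentences: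
--         lowered = sentence.lower()
--         score = sum(1 for phrase in IMPACT_PHRASES if phrase in lowered)
--         score += min(len(sentence) // 80, 3)
--         if best_score is None or score > best_score:
--             best_score = score
--             best = sentence
--     return best
-- ===== Notes on version B (the rewrite author's own statement) =====
-- stated objective: alternative
-- what changed: B replaces A's build-a-scored-list, stable reverse sort and take-the-head with a single pass that keeps the running best score and sentence (strict > keeps the earliest maximum, matching the stable sort).
import Mathlib
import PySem

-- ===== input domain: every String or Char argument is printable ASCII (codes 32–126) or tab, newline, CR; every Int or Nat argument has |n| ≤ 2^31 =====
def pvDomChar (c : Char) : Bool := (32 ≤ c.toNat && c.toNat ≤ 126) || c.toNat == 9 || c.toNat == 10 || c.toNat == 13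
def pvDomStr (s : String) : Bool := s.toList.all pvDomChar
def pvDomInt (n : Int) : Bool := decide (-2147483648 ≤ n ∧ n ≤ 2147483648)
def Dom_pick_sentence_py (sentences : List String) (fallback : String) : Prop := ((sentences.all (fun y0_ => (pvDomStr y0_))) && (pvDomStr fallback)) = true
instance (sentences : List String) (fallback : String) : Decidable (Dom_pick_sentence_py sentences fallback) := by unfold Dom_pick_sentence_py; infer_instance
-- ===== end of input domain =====

-- B replaces A's build-score-list + stable reverse sort + take-head with a single running-best
-- pass (objective: alternative single-pass strategy; not measured as faster, scoring dominates).

-- shared module constant IMPACT_PHRASES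
def pvImpactPhrases : List String :=
  ["would", "will", "proposes", "requires", "increase", "decrease", "restrict",
   "expand", "tighten", "mandate", "compliance", "cost", "standard",
   "investigation", "approval", "reclassify", "delay"]

-- the score expression both Pythons compute for one sentence:
-- sum(1 for phrase in IMPACT_PHRASES if phrase in sentence.lower()) + min(len(sentence)//80, 3)
def pvScore (sentence : String) : Int :=
  (pvImpactPhrases.foldl
      (fun acc phrase => if PySem.Str.isIn phrase (PySem.Str.lower sentence) then acc + 1 else acc) 0)
    + min (PySem.Int.floordiv (PySem.Str.len sentence) 80) 3

-- ===== PORT A =====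
def pick_sentence_py (sentences : List String) (fallback : String) : String :=
  let scored := sentences.foldl (fun acc sentence => acc ++ [(pvScore sentence, sentence)]) []
  let sortedScored := PySem.List.sorted scored (fun item => item.1) true
  match sortedScored with
  | [] => fallback
  | p :: _ => p.2

-- ===== PORT B =====
def pick_sentence_py_alt (sentences : List String) (fallback : String) : String :=
  (sentences.foldl
      (fun (st : Option Int × String) sentence =>
        let score := pvScore sentence
        match st.1 with
        | none => (some score, sentence)
        | some best => if score > best then (some score, sentence) else st)
      (none, fallback)).2

-- ===== PRECONDITION & SPEC =====
def Spec_pick_sentence_py (sentences : List String) (fallback : String) (out : String) : Prop := out = pick_sentence_py_alt sentences fallback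
instance (sentences : List String) (fallback : String) (out : String) : Decidable (Spec_pick_sentence_py sentences fallback out) := by unfold Spec_pick_sentence_py; infer_instance

-- ===== CLAIM (what is proved, stated in full; the proofs are below) =====
def Claim_equal_pick_sentence_py : Prop := ∀ (sentences : List String) (fallback : String), Dom_pick_sentence_py sentences fallback → Spec_pick_sentence_py sentences fallback (pick_sentence_py sentences fallback)

-- ===== LEMMAS AND PROOFS =====

-- the relation between A's partially built insertion-sorted list and B's running-best state:
-- B's state mirrors the head of A's list (B starts from (none, fallback) on the empty list).
def pvRel (fallback : String) (acc : List (Int × String)) (st : Option Int × String) : Prop :=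
  match acc with
  | [] => st = (none, fallback)
  | p :: _ => st = (some p.1, p.2)

-- inserting x into acc: the new head is x exactly when acc is empty or x's key beats the old head's
theorem pvInsertBy_head (x : Int × String) (acc : List (Int × String)) :
    PySem.List.insertBy (fun a b => decide (b.1 < a.1)) x acc =
      match acc with
      | [] => [x]
      | y :: ys => if y.1 < x.1 then x :: y :: ys
                   else y :: PySem.List.insertBy (fun a b => decide (b.1 < a.1)) x ys := by
  cases acc with
  | nil => rfl
  | cons y ys => simp [PySem.List.insertBy]

-- the invariant is preserved by one step of each loop
theorem pvRel_step (fallback : String) (acc : List (Int × String)) (st : Option Int × String)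
    (s : String) (h : pvRel fallback acc st) :
    pvRel fallback (PySem.List.insertBy (fun a b => decide (b.1 < a.1)) (pvScore s, s) acc)
      ((fun (st : Option Int × String) sentence =>
          let score := pvScore sentence
          match st.1 with
          | none => (some score, sentence)
          | some best => if score > best then (some score, sentence) else st) st s) := by
  cases acc with
  | nil =>
    simp [pvRel] at h
    subst h
    simp [pvRel, PySem.List.insertBy]
  | cons y ys =>
    simp [pvRel] at h
    subst h
    rw [pvInsertBy_head]
    dsimp only
    by_cases hy : y.1 < pvScore s
    · simp [pvRel, hy]
    · simp only [if_neg hy]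
      simp [pvRel]

-- the invariant carried through the whole fold
theorem pvRel_foldl (fallback : String) (l : List String) (acc : List (Int × String))
    (st : Option Int × String) (h : pvRel fallback acc st) :
    pvRel fallback
      (l.foldl (fun a s => PySem.List.insertBy (fun a b => decide (b.1 < a.1)) (pvScore s, s) a) acc)
      (l.foldl (fun (st : Option Int × String) sentence =>
          let score := pvScore sentence
          match st.1 with
          | none => (some score, sentence)
          | some best => if score > best then (some score, sentence) else st) st) := by
  induction l generalizing acc st with
  | nil => exact h
  | cons x xs ih => exact ih _ _ (pvRel_step fallback acc st x h)

-- ===== VERDICT (by name: the statement is the Claim_ definition above) =====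
theorem pick_sentence_py_spec : Claim_equal_pick_sentence_py := by
  intro sentences fallback _
  unfold Spec_pick_sentence_py pick_sentence_py pick_sentence_py_alt
  dsimp only
  rw [PySem.List.foldl_append_singleton_eq_map, List.nil_append,
      PySem.List.sorted_rev_eq_foldl_insertBy, List.foldl_map]
  have h := pvRel_foldl fallback sentences [] (none, fallback) (by simp [pvRel])
  revert h
  cases hl : sentences.foldl
      (fun a s => PySem.List.insertBy (fun a b => decide (b.1 < a.1)) (pvScore s, s) a) [] with
  | nil => intro h; simp [pvRel] at h; simp [h]
  | cons p t => intro h; simp [pvRel] at h; simp [h]
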